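-- pv_equiv track=rewrite | github.com/mjlomeli/KnowNow-Nav | Similarity.py | combine_tf
-- ===== SOURCE A (Python) =====
-- def combine_tf(tf: list):
--     combined = {}
--     for item in tf:
--         for term, freq in item.items():
--             if term in combined:
--                 combined[term] += freq
--             else:
--                 combined[term] = freq
--     return combined
-- ===== SOURCE B (Python) =====
-- def combine_tf(tf: list):
--     # Two-pass: collect distinct terms in first-appearance order, then reduce per term.
--     terms = {}
--     for item in tf:
--         for term in item:
--             terms[term] = None
--     return {term: sum(item.get(term, 0) for item in tf) for term in terms}
-- ===== Notes on version B (the rewrite author's own statement) =====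
-- stated objective: alternative
-- what changed: Replaces A's single streaming accumulate-into-one-dict with a two-pass index-then-reduce: first collect the distinct terms in first-appearance order, then compute each term's total with a sum over the whole list of dicts.
import Mathlib
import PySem

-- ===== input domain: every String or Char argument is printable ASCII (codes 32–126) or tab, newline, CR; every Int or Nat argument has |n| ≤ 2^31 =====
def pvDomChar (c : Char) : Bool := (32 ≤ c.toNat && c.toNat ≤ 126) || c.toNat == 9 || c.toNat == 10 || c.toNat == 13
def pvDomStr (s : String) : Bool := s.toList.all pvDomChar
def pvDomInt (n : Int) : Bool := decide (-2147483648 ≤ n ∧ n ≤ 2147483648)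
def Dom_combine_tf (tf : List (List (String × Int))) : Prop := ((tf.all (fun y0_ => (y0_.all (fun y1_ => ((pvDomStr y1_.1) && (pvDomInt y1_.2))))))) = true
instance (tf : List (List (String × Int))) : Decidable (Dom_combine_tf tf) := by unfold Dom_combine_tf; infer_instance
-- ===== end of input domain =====

-- B replaces the streaming accumulate with a two-pass index-then-reduce (collect terms, then sum per term); same results, no speed claim.

-- ===== PORT A =====
-- combined = {}; for item in tf: for term, freq in item.items():
--   if term in combined: combined[term] += freq  (read-then-set = insert with getD)
--   else: combined[term] = freq
def combine_tf (tf : List (List (String × Int))) : List (String × Int) :=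
  (tf.foldl
    (fun (combined : PySem.Dict String Int) item =>
      item.foldl
        (fun c p =>
          if c.contains p.1 then c.insert p.1 (c.getD p.1 0 + p.2)
          else c.insert p.1 p.2)
        combined)
    PySem.Dict.empty).items

-- ===== PORT B =====
-- terms = {}; for item in tf: for term in item: terms[term] = None
-- return {term: sum(item.get(term, 0) for item in tf) for term in terms}
def combine_tf_alt (tf : List (List (String × Int))) : List (String × Int) :=
  let terms : PySem.Dict String (Option Int) :=
    tf.foldl
      (fun t item => item.foldl (fun t p => t.insert p.1 none) t)
      PySem.Dict.empty
  terms.keys.map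
    (fun term =>
      (term, tf.foldl (fun s item => s + (PySem.Dict.mk item).getD term 0) 0))

-- ===== PRECONDITION & SPEC =====
-- Pre_ excludes only inner association lists with DUPLICATE keys: those encode no Python dict
-- (dict construction collapses duplicates), so the pair-level reading of either port is claimed
-- only on faithful dict encodings; every actual Python input has such an encoding inside Pre_.
def Pre_combine_tf (tf : List (List (String × Int))) : Prop :=
  ∀ item ∈ tf, (item.map Prod.fst).Nodup
instance (tf : List (List (String × Int))) : Decidable (Pre_combine_tf tf) := by
  unfold Pre_combine_tf; infer_instance
def pvWitness_combine_tf : (List (List (String × Int))) :=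
  [[("a", 1), ("b", 2)], [("a", 3)]]
def Spec_combine_tf (tf : List (List (String × Int))) (out : List (String × Int)) : Prop := out = combine_tf_alt tf
instance (tf : List (List (String × Int))) (out : List (String × Int)) : Decidable (Spec_combine_tf tf out) := by unfold Spec_combine_tf; infer_instance

-- ===== CLAIM (what is proved, stated in full; the proofs are below) =====
def Claim_equal_combine_tf : Prop := ∀ (tf : List (List (String × Int))), Dom_combine_tf tf → Pre_combine_tf tf → Spec_combine_tf tf (combine_tf tf)

-- ===== LEMMAS AND PROOFS =====

def sumFor (ps : List (String × Int)) (k : String) : Int :=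
  ((ps.filter (fun p => p.1 == k)).map (·.2)).sum

def newKeys (ks : List String) (ps : List (String × Int)) : List String :=
  match ps with
  | [] => []
  | p :: rest =>
    if p.1 ∈ ks then newKeys ks rest
    else p.1 :: newKeys (ks ++ [p.1]) rest

theorem sumFor_cons (p : String × Int) (ps : List (String × Int)) (k : String) :
    sumFor (p :: ps) k = (if p.1 == k then p.2 else 0) + sumFor ps k := by
  simp only [sumFor, List.filter_cons]
  split <;> simp

theorem sumFor_append (xs ys : List (String × Int)) (k : String) :
    sumFor (xs ++ ys) k = sumFor xs k + sumFor ys k := by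
  simp [sumFor, List.filter_append]

theorem sumFor_eq_zero_of_not_mem (ps : List (String × Int)) (t : String)
    (h : t ∉ ps.map Prod.fst) : sumFor ps t = 0 := by
  have : ps.filter (fun p => p.1 == t) = [] := by
    rw [List.filter_eq_nil_iff]
    intro p hp
    simp only [beq_iff_eq]
    intro he
    exact h (List.mem_map.mpr ⟨p, hp, he⟩)
  simp [sumFor, this]

theorem not_mem_of_mem_newKeys :
    ∀ (ps : List (String × Int)) (ks : List String) (t : String),
      t ∈ newKeys ks ps → t ∉ ks := by
  intro ps
  induction ps with
  | nil => intro ks t ht; simp [newKeys] at ht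
  | cons p rest ih =>
    intro ks t ht
    simp only [newKeys] at ht
    split at ht
    · exact ih ks t ht
    · rcases List.mem_cons.mp ht with h | h
      · subst h; assumption
      · intro hk
        exact ih _ t h (List.mem_append_left _ hk)

theorem foldl_foldl_flatMap {σ β : Type} (f : σ → β → σ) :
    ∀ (tf : List (List β)) (d : σ),
      tf.foldl (fun d item => item.foldl f d) d = (tf.flatMap id).foldl f d := by
  intro tf
  induction tf with
  | nil => intro d; rfl
  | cons item rest ih => intro d; simp [List.foldl_append, ih]

theorem foldA_items :
    ∀ (ps : List (String × Int)) (d : PySem.Dict String Int), d.keys.Nodup →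
      (ps.foldl (fun c p =>
          if c.contains p.1 then c.insert p.1 (c.getD p.1 0 + p.2)
          else c.insert p.1 p.2) d).items
        = d.items.map (fun kv => (kv.1, kv.2 + sumFor ps kv.1))
          ++ (newKeys d.keys ps).map (fun k => (k, sumFor ps k)) := by
  intro ps
  induction ps with
  | nil =>
    intro d _
    simp [newKeys, sumFor]
  | cons p rest ih =>
    intro d hd
    rcases p with ⟨k, v⟩
    simp only [List.foldl_cons]
    by_cases hc : d.contains k = true
    · have hk : k ∈ d.keys := (PySem.Dict.contains_iff_mem_keys d k).mp hc
      rw [if_pos hc,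
          ih _ (by rw [PySem.Dict.keys_insert_of_contains d _ hc]; exact hd),
          PySem.Dict.items_insert_of_contains d _ hc,
          PySem.Dict.keys_insert_of_contains d _ hc]
      have hnk : newKeys d.keys ((k, v) :: rest) = newKeys d.keys rest := by
        simp [newKeys, hk]
      rw [hnk, List.map_map]
      congr 1
      · apply List.map_congr_left
        intro q hq
        rcases q with ⟨a, b⟩
        simp only [Function.comp]
        by_cases hak : (a == k) = true
        · have ha : a = k := beq_iff_eq.mp hak
          subst ha
          have hb : d.getD a 0 = b := PySem.Dict.getD_of_mem_items d hq hd 0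
          simp [hb, sumFor_cons]
          ring
        · have h2 : (k == a) = false := by
            rw [beq_eq_false_iff_ne]
            intro h; exact hak (beq_iff_eq.mpr (Eq.symm h))
          have h1 : (a == k) = false := by
            rw [beq_eq_false_iff_ne]
            intro h; exact hak (beq_iff_eq.mpr h)
          simp only [h1, Bool.false_eq_true, if_false]
          simp [sumFor_cons, h2]
      · apply List.map_congr_left
        intro t ht
        have htk : t ∉ d.keys := not_mem_of_mem_newKeys rest d.keys t ht
        have : (k == t) = false := by
          rw [beq_eq_false_iff_ne]
          intro h; subst h; exact htk hk
        simp [sumFor_cons, this]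
    · have hc' : d.contains k = false := by simpa using hc
      have hk : k ∉ d.keys := fun h => by
        rw [(PySem.Dict.contains_iff_mem_keys d k).mpr h] at hc'; simp at hc'
      rw [if_neg (by simp [hc']),
          ih _ (PySem.Dict.nodup_keys_insert d k v hd),
          PySem.Dict.items_insert_of_not_contains d _ hc',
          PySem.Dict.keys_insert_of_not_contains d _ hc']
      have hnk : newKeys d.keys ((k, v) :: rest) = k :: newKeys (d.keys ++ [k]) rest := by
        simp [newKeys, hk]
      rw [hnk, List.map_append]
      simp only [List.map_cons, List.map_nil, List.append_assoc, List.singleton_append]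
      congr 1
      · apply List.map_congr_left
        intro q hq
        rcases q with ⟨a, b⟩
        have ha : a ∈ d.keys := PySem.Dict.mem_keys_of_mem_items d hq
        have : (k == a) = false := by
          rw [beq_eq_false_iff_ne]
          intro h; subst h; exact hk ha
        simp [sumFor_cons, this]
      · congr 1
        · simp [sumFor_cons]
        · apply List.map_congr_left
          intro t ht
          have htk : t ∉ d.keys ++ [k] := not_mem_of_mem_newKeys rest _ t ht
          have : (k == t) = false := by
            rw [beq_eq_false_iff_ne]
            intro h; subst h
            exact htk (List.mem_append_right _ (List.mem_singleton.mpr rfl))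
          simp [sumFor_cons, this]

theorem foldB_keys :
    ∀ (ps : List (String × Int)) (t : PySem.Dict String (Option Int)),
      (ps.foldl (fun t p => t.insert p.1 none) t).keys = t.keys ++ newKeys t.keys ps := by
  intro ps
  induction ps with
  | nil => intro t; simp [newKeys]
  | cons p rest ih =>
    intro t
    simp only [List.foldl_cons]
    by_cases hc : t.contains p.1 = true
    · have hk : p.1 ∈ t.keys := (PySem.Dict.contains_iff_mem_keys t p.1).mp hc
      rw [ih, PySem.Dict.keys_insert_of_contains t _ hc]
      simp [newKeys, hk]
    · have hc' : t.contains p.1 = false := by simpa using hc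
      have hk : p.1 ∉ t.keys := fun h => by
        rw [(PySem.Dict.contains_iff_mem_keys t p.1).mpr h] at hc'; simp at hc'
      rw [ih, PySem.Dict.keys_insert_of_not_contains t _ hc']
      simp [newKeys, hk]

theorem getD_mk_eq_sumFor :
    ∀ (item : List (String × Int)) (t : String), (item.map Prod.fst).Nodup →
      (PySem.Dict.mk item).getD t 0 = sumFor item t := by
  intro item
  induction item with
  | nil => intro t _; rfl
  | cons p rest ih =>
    intro t hnd
    rcases p with ⟨k, v⟩
    simp only [List.map_cons, List.nodup_cons] at hnd
    have hstep : (PySem.Dict.mk ((k, v) :: rest)).getD t 0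
        = if k == t then v else (PySem.Dict.mk rest).getD t 0 := by
      simp [PySem.Dict.getD_eq_get?_getD, PySem.Dict.get?_mk_cons]
      split <;> rfl
    rw [hstep, sumFor_cons]
    by_cases h : (k == t) = true
    · have ht : k = t := beq_iff_eq.mp h
      subst ht
      rw [sumFor_eq_zero_of_not_mem rest k hnd.1]
      simp
    · have h' : (k == t) = false := by simpa using h
      simp only [h', Bool.false_eq_true, if_false]
      rw [ih t hnd.2]
      simp

theorem foldB_val :
    ∀ (tf : List (List (String × Int))) (t : String) (s : Int),
      (∀ item ∈ tf, (item.map Prod.fst).Nodup) →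
      tf.foldl (fun s item => s + (PySem.Dict.mk item).getD t 0) s
        = s + sumFor (tf.flatMap id) t := by
  intro tf
  induction tf with
  | nil => intro t s _; simp [sumFor]
  | cons item rest ih =>
    intro t s hpre
    simp only [List.foldl_cons, List.flatMap_cons, id]
    rw [sumFor_append, ih t _ (fun i hi => hpre i (List.mem_cons_of_mem _ hi)),
        getD_mk_eq_sumFor item t (hpre item List.mem_cons_self)]
    ring


theorem combine_tf_core : ∀ (tf : List (List (String × Int))),
    (∀ item ∈ tf, (item.map Prod.fst).Nodup) →
    (tf.foldl
      (fun (combined : PySem.Dict String Int) item =>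
        item.foldl
          (fun c p =>
            if c.contains p.1 then c.insert p.1 (c.getD p.1 0 + p.2)
            else c.insert p.1 p.2)
          combined)
      PySem.Dict.empty).items =
    (tf.foldl
      (fun (t : PySem.Dict String (Option Int)) item => item.foldl (fun t p => t.insert p.1 none) t)
      PySem.Dict.empty).keys.map
      (fun term => (term, tf.foldl (fun s item => s + (PySem.Dict.mk item).getD term 0) 0)) := by
  intro tf hpre
  rw [foldl_foldl_flatMap, foldl_foldl_flatMap,
      foldA_items _ _ (by rw [show (PySem.Dict.empty : PySem.Dict String Int).keys = [] from rfl]; exact List.nodup_nil),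
      foldB_keys]
  rw [show (PySem.Dict.empty : PySem.Dict String Int).items = [] from rfl,
      show (PySem.Dict.empty : PySem.Dict String (Option Int)).keys = [] from rfl]
  simp only [List.map_nil, List.nil_append]
  apply List.map_congr_left
  intro t _
  rw [foldB_val tf t 0 hpre]
  simp

-- ===== VERDICT (by name: the statement is the Claim_ definition above) =====
theorem combine_tf_spec : Claim_equal_combine_tf := by
  intro tf _ hpre
  exact combine_tf_core tf hpre
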